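-- pv_equiv track=rewrite | github.com/Callek/advent-of-code | pysrc/py_aoc/y2020/day6.py | create_sets_all_yes
-- ===== SOURCE A (Python) =====
-- def create_sets_all_yes(raw_data: str) -> list[set[str]]:
--     """Sets with all yes"""
--     groups: list[set[str]] = []
--     for group in raw_data.split("\n\n"):
--         answers: set[str] | None = None
--         for person in group.split("\n"):
--             if not person:
--                 continue
--             if answers is None:
--                 answers = set(person)
--             else:
--                 answers &= set(person)
--         if answers:
--             groups.append(answers)
--     return groups
-- ===== SOURCE B (Python) =====
-- def create_sets_all_yes(raw_data: str) -> list[set[str]]: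
--     """Sets with all yes (counting re-implementation)"""
--     groups: list[set[str]] = []
--     for group in raw_data.split("\n\n"):
--         counts: dict[str, int] = {}
--         num_people = 0
--         for person in group.split("\n"):
--             if person:
--                 num_people += 1
--                 for letter in set(person):
--                     counts[letter] = counts.get(letter, 0) + 1
--         common = {letter for letter, cnt in counts.items() if cnt == num_people}
--         if common:
--             groups.append(common)
--     return groups
-- ===== Notes on version B (the rewrite author's own statement) =====
-- stated objective: alternative
-- what changed: Replaces per-group person-by-person set intersection with a single tally: count, per letter (deduplicated within each person), how many people said it, then keep the letters whose count equals the number of non-empty persons.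
import Mathlib
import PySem

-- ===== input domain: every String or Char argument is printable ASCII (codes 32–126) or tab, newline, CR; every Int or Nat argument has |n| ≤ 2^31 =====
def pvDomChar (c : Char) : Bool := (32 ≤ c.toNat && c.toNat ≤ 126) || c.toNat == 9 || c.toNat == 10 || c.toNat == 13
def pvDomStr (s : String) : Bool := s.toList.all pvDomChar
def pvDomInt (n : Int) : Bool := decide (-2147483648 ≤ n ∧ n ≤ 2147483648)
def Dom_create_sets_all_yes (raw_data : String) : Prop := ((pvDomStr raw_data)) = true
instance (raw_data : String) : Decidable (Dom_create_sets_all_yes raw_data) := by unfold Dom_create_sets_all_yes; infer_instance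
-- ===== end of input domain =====

-- B replaces A's person-by-person set intersection with a single per-group tally (count, per letter,
-- how many people said it; keep letters said by every person) — objective: alternative algorithm.

-- s.split(sep) for the nonempty literal separators "\n\n" and "\n" used here
-- (exact: PySem.Str.split? s sep = some (pvSplit s sep) whenever sep ≠ "").
def pvSplit (s sep : String) : List String :=
  (PySem.Chars.splitOn s.toList sep.toList).map String.ofList

-- set(person): the letters of a person as one-character strings, first occurrences in order
def pvLetters (p : String) : List String := p.toList.map (fun c => String.ofList [c])

-- ===== PORT A =====
def create_sets_all_yes (raw_data : String) : List (List String) :=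
  (pvSplit raw_data "\n\n").foldl (fun groups group =>
    let answers : Option (PySem.Set String) :=
      (pvSplit group "\n").foldl (fun answers person =>
        if person = "" then answers
        else
          match answers with
          | none => some (PySem.Set.ofList (pvLetters person))
          | some s => some (PySem.Set.inter s (PySem.Set.ofList (pvLetters person))))
        none
    match answers with
    | none => groups
    | some s => if s ≠ [] then groups ++ [s] else groups) []

-- ===== PORT B =====
def create_sets_all_yes_alt (raw_data : String) : List (List String) :=
  (pvSplit raw_data "\n\n").foldl (fun groups group =>
    let st : PySem.Dict String Int × Int :=
      (pvSplit group "\n").foldl (fun st person =>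
        if person = "" then st
        else ((PySem.Set.ofList (pvLetters person)).foldl
                (fun d letter => d.insert letter (d.getD letter 0 + 1)) st.1,
              st.2 + 1))
        (PySem.Dict.empty, 0)
    let common : PySem.Set String :=
      st.1.items.foldl
        (fun acc kv => if kv.2 = st.2 then PySem.Set.add acc kv.1 else acc)
        PySem.Set.empty
    if common ≠ [] then groups ++ [common] else groups) []

-- ===== PRECONDITION & SPEC =====
def Spec_create_sets_all_yes (raw_data : String) (out : List (List String)) : Prop := out = create_sets_all_yes_alt raw_data
instance (raw_data : String) (out : List (List String)) : Decidable (Spec_create_sets_all_yes raw_data out) := by unfold Spec_create_sets_all_yes; infer_instance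

-- ===== CLAIM (what is proved, stated in full; the proofs are below) =====
def Claim_equal_create_sets_all_yes : Prop := ∀ (raw_data : String), Dom_create_sets_all_yes raw_data → Spec_create_sets_all_yes raw_data (create_sets_all_yes raw_data)

-- ===== LEMMAS AND PROOFS =====

-- named copies of the ports' inner step lambdas (definitionally equal to them)
def stepA : Option (PySem.Set String) → String → Option (PySem.Set String) :=
  fun answers person =>
    if person = "" then answers
    else
      match answers with
      | none => some (PySem.Set.ofList (pvLetters person))
      | some s => some (PySem.Set.inter s (PySem.Set.ofList (pvLetters person)))

def stepB : (PySem.Dict String Int × Int) → String → (PySem.Dict String Int × Int) :=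
  fun st person =>
    if person = "" then st
    else ((PySem.Set.ofList (pvLetters person)).foldl
            (fun d letter => d.insert letter (d.getD letter 0 + 1)) st.1,
          st.2 + 1)

-- the non-empty persons of a group
def pvPersons (lines : List String) : List String := lines.filter (fun p => !(p == ""))

-- all letters of all persons, each person deduplicated
def pvLof (ps : List String) : List String :=
  ps.flatMap (fun p => PySem.Set.ofList (pvLetters p))

def Qall (lines : List String) (c : String) : Bool :=
  lines.all (fun p => p == "" || (PySem.Set.ofList (pvLetters p)).contains c)

theorem foldl_fn_congr {α β : Type} (f g : α → β → α) (h : ∀ a b, f a b = g a b)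
    (l : List β) (a : α) : List.foldl f a l = List.foldl g a l := by
  induction l generalizing a with
  | nil => rfl
  | cons x xs ih => simp only [List.foldl_cons, h, ih]

theorem stepA_someFilter (lines : List String) (s : PySem.Set String) :
    List.foldl stepA (some s) lines = some (s.filter (Qall lines)) := by
  induction lines generalizing s with
  | nil =>
    have hq : Qall [] = fun _ => true := by funext c; simp [Qall]
    simp [hq]
  | cons p rest ih =>
    by_cases hp : p = ""
    · simp only [List.foldl_cons, stepA, if_pos hp, ih]
      congr 1
      apply List.filter_congr
      intro x _
      simp [Qall, hp]
    · have hpb : (p == "") = false := by simpa using hp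
      simp only [List.foldl_cons, stepA, if_neg hp, PySem.Set.inter, ih]
      rw [List.filter_filter]
      congr 1
      apply List.filter_congr
      intro x _
      simp [Qall, hpb, Bool.and_comm]

theorem Qall_persons (lines : List String) (c : String) :
    Qall lines c = (pvPersons lines).all (fun p => (PySem.Set.ofList (pvLetters p)).contains c) := by
  induction lines with
  | nil => rfl
  | cons p rest ih =>
    by_cases hp : p = ""
    · simp [Qall, pvPersons, hp]
    · have hpb : (p == "") = false := by simpa using hp
      simp [Qall, pvPersons, hpb]

theorem stepA_none (lines : List String) :
    List.foldl stepA none lines =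
      match pvPersons lines with
      | [] => none
      | h :: t => some ((PySem.Set.ofList (pvLetters h)).filter
          (fun c => t.all (fun p => (PySem.Set.ofList (pvLetters p)).contains c))) := by
  induction lines with
  | nil => rfl
  | cons p rest ih =>
    by_cases hp : p = ""
    · simpa [stepA, hp, pvPersons] using ih
    · have hpb : (p == "") = false := by simpa using hp
      simp only [List.foldl_cons, stepA, if_neg hp, stepA_someFilter, pvPersons,
        List.filter_cons, hpb, Bool.not_false, if_true]
      congr 1
      apply List.filter_congr
      intro c _
      rw [Qall_persons]
      rfl

theorem pvLof_cons (p : String) (t : List String) :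
    pvLof (p :: t) = (PySem.Set.ofList (pvLetters p) : List String) ++ pvLof t := rfl

theorem stepB_state (lines : List String) (d : PySem.Dict String Int) (n : Int) :
    List.foldl stepB (d, n) lines =
      (List.foldl (fun d letter => d.insert letter (d.getD letter 0 + 1)) d (pvLof (pvPersons lines)),
       n + ((pvPersons lines).length : Int)) := by
  induction lines generalizing d n with
  | nil => simp [pvPersons, pvLof]
  | cons p rest ih =>
    by_cases hp : p = ""
    · simp [stepB, hp, pvPersons, ih]
    · have hpb : (p == "") = false := by simpa using hp
      simp only [List.foldl_cons, stepB, if_neg hp, ih, pvPersons, List.filter_cons, hpb,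
        Bool.not_false, if_true, pvLof_cons, List.foldl_append, List.length_cons,
        Prod.mk.injEq]
      refine ⟨trivial, ?_⟩
      push_cast
      ring

theorem foldl_add_if (q : String → Prop) [DecidablePred q] (l : List String) (acc : PySem.Set String)
    (hnd : l.Nodup) (hdisj : ∀ x ∈ l, x ∉ acc) :
    List.foldl (fun acc k => if q k then PySem.Set.add acc k else acc) acc l
      = acc ++ l.filter (fun k => decide (q k)) := by
  induction l generalizing acc with
  | nil => simp
  | cons k t ih =>
    have hk : k ∉ acc := hdisj k (by simp)
    have hknd : k ∉ t := (List.nodup_cons.mp hnd).1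
    have hadd : PySem.Set.add acc k = acc ++ [k] := by
      simp [PySem.Set.add, PySem.Set.contains_eq_listContains, hk]
    by_cases hq : q k
    · rw [List.foldl_cons, if_pos hq, hadd,
        ih (acc ++ [k]) (List.nodup_cons.mp hnd).2 ?_]
      · simp [hq]
      · intro x hx
        simp only [List.mem_append, List.mem_singleton, not_or]
        exact ⟨hdisj x (List.mem_cons_of_mem _ hx), fun e => hknd (e ▸ hx)⟩
    · rw [List.foldl_cons, if_neg hq,
        ih acc (List.nodup_cons.mp hnd).2 (fun x hx => hdisj x (List.mem_cons_of_mem _ hx))]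
      simp [hq]

theorem count_letters (p : String) (k : String) :
    List.count k (PySem.Set.ofList (pvLetters p) : List String)
      = if k ∈ (PySem.Set.ofList (pvLetters p) : List String) then 1 else 0 := by
  split
  · exact List.count_eq_one_of_mem (PySem.Set.nodup_ofList _) ‹_›
  · exact List.count_eq_zero_of_not_mem ‹_›

theorem count_Lof_le (ps : List String) (k : String) :
    List.count k (pvLof ps) ≤ ps.length := by
  induction ps with
  | nil => simp [pvLof]
  | cons p t ih =>
    rw [pvLof_cons, List.count_append, List.length_cons]
    have := count_letters p k
    split at this <;> omega

theorem count_Lof_eq (ps : List String) (k : String) :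
    List.count k (pvLof ps) = ps.length ↔
      ∀ p ∈ ps, k ∈ (PySem.Set.ofList (pvLetters p) : List String) := by
  induction ps with
  | nil => simp [pvLof]
  | cons p t ih =>
    rw [pvLof_cons, List.count_append, List.length_cons]
    have h1 := count_letters p k
    have h2 := count_Lof_le t k
    constructor
    · intro h
      have hc : k ∈ (PySem.Set.ofList (pvLetters p) : List String) := by
        by_contra hne
        rw [if_neg hne] at h1
        omega
      have ht : List.count k (pvLof t) = t.length := by
        rw [if_pos hc] at h1
        omega
      intro x hx
      rcases List.mem_cons.mp hx with rfl | hx'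
      · exact hc
      · exact (ih.mp ht) x hx'
    · intro h
      have hc : k ∈ (PySem.Set.ofList (pvLetters p) : List String) := h p (List.mem_cons_self ..)
      have ht : List.count k (pvLof t) = t.length :=
        ih.mpr (fun x hx => h x (List.mem_cons_of_mem _ hx))
      rw [if_pos hc] at h1
      omega

theorem ofList_self (l : List String) (h : l.Nodup) : PySem.Set.ofList l = l := by
  induction l with
  | nil => rfl
  | cons x xs ih =>
    have hx : x ∉ xs := (List.nodup_cons.mp h).1
    rw [PySem.Set.ofList_cons, ih (List.nodup_cons.mp h).2]
    unfold PySem.Set.discard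
    rw [List.filter_eq_self.mpr]
    intro y hy
    simp only [Bool.not_eq_eq_eq_not, Bool.not_true, beq_eq_false_iff_ne, ne_eq]
    exact fun e => hx (e ▸ hy)

theorem filter_update (q : String → Bool) (s : PySem.Set String) (ys : List String)
    (h : ∀ k, q k = true → k ∈ s) :
    (PySem.Set.update s ys).filter q = s.filter q := by
  induction ys generalizing s with
  | nil => rfl
  | cons y t ih =>
    simp only [PySem.Set.update, List.foldl_cons]
    by_cases hy : PySem.Set.contains s y = true
    · rw [show PySem.Set.add s y = s from by unfold PySem.Set.add; rw [if_pos hy]]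
      exact ih s h
    · rw [show PySem.Set.add s y = s ++ [y] from by unfold PySem.Set.add; rw [if_neg hy]]
      have hys : y ∉ s := fun hmem => hy ((PySem.Set.contains_iff s y).mpr hmem)
      have ht : (PySem.Set.update (s ++ [y]) t).filter q = (s ++ [y]).filter q :=
        ih (s ++ [y]) (fun k hk => List.mem_append_left _ (h k hk))
      rw [show List.foldl PySem.Set.add (s ++ [y]) t = PySem.Set.update (s ++ [y]) t from rfl,
        ht, List.filter_append]
      have hqy : q y = false := by
        by_contra hq
        exact hys (h y (by simpa using hq))
      simp [hqy]

theorem group_sets_eq (h : String) (t : List String) :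
    (PySem.Set.ofList (pvLetters h)).filter
        (fun c => t.all (fun p => (PySem.Set.ofList (pvLetters p)).contains c))
      = (List.foldl (fun d letter => d.insert letter (d.getD letter 0 + 1)) PySem.Dict.empty
            (pvLof (h :: t))).items.foldl
          (fun acc kv => if kv.2 = ((0 : Int) + (((h :: t).length : Nat) : Int))
            then PySem.Set.add acc kv.1 else acc) PySem.Set.empty := by
  rw [PySem.Dict.foldl_insert_getD_add_one_eq_counter, PySem.Dict.items_counter, List.foldl_map]
  rw [foldl_add_if (fun k => ((List.count k (pvLof (h :: t)) : Int)
        = ((0 : Int) + (((h :: t).length : Nat) : Int)))) (PySem.Set.ofList (pvLof (h :: t)))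
      PySem.Set.empty (PySem.Set.nodup_ofList _) (by intro x hx; simp [PySem.Set.empty])]
  simp only [PySem.Set.empty, List.nil_append]
  have e2 : (PySem.Set.ofList (pvLof (h :: t)) : PySem.Set String)
      = PySem.Set.update (PySem.Set.ofList (pvLetters h)) (pvLof t) := by
    rw [pvLof_cons, PySem.Set.ofList_append, ofList_self _ (PySem.Set.nodup_ofList _)]
  rw [e2]
  rw [filter_update _ _ _ ?hq]
  case hq =>
    intro k hk
    have hc := of_decide_eq_true hk
    have hcn : List.count k (pvLof (h :: t)) = (h :: t).length := by omega
    exact ((count_Lof_eq (h :: t) k).mp hcn) h (List.mem_cons_self ..)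
  symm
  apply List.filter_congr
  intro x hx
  rw [Bool.eq_iff_iff]
  simp only [decide_eq_true_eq, List.all_eq_true, PySem.Set.contains_iff]
  have hiff := count_Lof_eq (h :: t) x
  constructor
  · intro hc p hp
    have hcn : List.count x (pvLof (h :: t)) = (h :: t).length := by omega
    exact (hiff.mp hcn) p (List.mem_cons_of_mem _ hp)
  · intro hall
    have hcn : List.count x (pvLof (h :: t)) = (h :: t).length :=
      hiff.mpr (fun p hp => (List.mem_cons.mp hp).elim (fun e => e ▸ hx) (hall p))
    omega

theorem ports_eq (raw : String) : create_sets_all_yes raw = create_sets_all_yes_alt raw := by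
  unfold create_sets_all_yes create_sets_all_yes_alt
  apply foldl_fn_congr
  intro groups g
  show (match List.foldl stepA none (pvSplit g "\n") with
        | none => groups
        | some s => if s ≠ [] then groups ++ [s] else groups) =
       (let st := List.foldl stepB (PySem.Dict.empty, 0) (pvSplit g "\n")
        let common := st.1.items.foldl
          (fun acc kv => if kv.2 = st.2 then PySem.Set.add acc kv.1 else acc) PySem.Set.empty
        if common ≠ [] then groups ++ [common] else groups)
  rw [stepA_none, stepB_state]
  cases pvPersons (pvSplit g "\n") with
  | nil => simp [pvLof, PySem.Dict.empty, PySem.Set.empty]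
  | cons h t =>
    dsimp only
    rw [group_sets_eq h t]

-- ===== VERDICT (by name: the statement is the Claim_ definition above) =====
theorem create_sets_all_yes_spec : Claim_equal_create_sets_all_yes := by
  intro raw _
  show create_sets_all_yes raw = create_sets_all_yes_alt raw
  exact ports_eq raw
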